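-- pv_equiv track=rewrite | github.com/jjoshua2/arc_agi | dupes/44d8ac46_group-047/test_correct/981.py | transform
-- ===== SOURCE A (Python) =====
-- def transform(grid_lst: list[list[int]]) -> list[list[int]]:
--     if not grid_lst:
--         return []
--     rows = len(grid_lst)
--     if rows == 0:
--         return []
--     cols = len(grid_lst[0])
--     grid = [row[:] for row in grid_lst]
--     output = [row[:] for row in grid]
--
--     to_fill = set()
--
--     max_k = min(rows, cols)
--     for k in range(1, max_k + 1):
--         for r in range(rows - k + 1):
--             for c in range(cols - k + 1):
--                 # Check all cells in block are 0
--                 all_zero = True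
--                 for i in range(k):
--                     for j in range(k):
--                         if grid[r + i][c + j] != 0:
--                             all_zero = False
--                             break
--                     if not all_zero:
--                         break
--                 if not all_zero:
--                     continue
--
--                 # Check perimeters
--                 valid = True
--
--                 # Top
--                 if r > 0:
--                     for j in range(k):
--                         if grid[r - 1][c + j] != 5:
--                             valid = False
--                             break
--                 else:
--                     valid = False
--                 if not valid:
--                     continue
--
--                 # Bottom
--                 if r + k < rows:
--                     for j in range(k):
--                         if grid[r + k][c + j] != 5:
--                             valid = False
--                             break
--                 else:
--                     valid = False
--                 if not valid:
--                     continue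
--
--                 # Left
--                 if c > 0:
--                     for i in range(k):
--                         if grid[r + i][c - 1] != 5:
--                             valid = False
--                             break
--                 else:
--                     valid = False
--                 if not valid:
--                     continue
--
--                 # Right
--                 if c + k < cols:
--                     for i in range(k):
--                         if grid[r + i][c + k] != 5:
--                             valid = False
--                             break
--                 else:
--                     valid = False
--                 if not valid:
--                     continue
--
--                 # If valid, add all cells in the block to to_fill
--                 if valid:
--                     for i in range(k):
--                         for j in range(k):
--                             to_fill.add((r + i, c + j))
--
--     # Fill the cells
--     for pos in to_fill:
--         i, j = pos
--         output[i][j] = 2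
--
--     return output
-- ===== SOURCE B (Python) =====
-- def transform(grid_lst: list[list[int]]) -> list[list[int]]:
--     if not grid_lst:
--         return []
--     rows = len(grid_lst)
--     cols = len(grid_lst[0])
--     # Backward run lengths per row: zrun[i][j] = length of the run of 0s
--     # starting at (i, j); frun the same for 5s.
--     zrun, frun = [], []
--     for row in grid_lst:
--         n = len(row)
--         z = [0] * (n + 1)
--         f = [0] * (n + 1)
--         for j in range(n - 1, -1, -1):
--             z[j] = z[j + 1] + 1 if row[j] == 0 else 0
--             f[j] = f[j + 1] + 1 if row[j] == 5 else 0
--         zrun.append(z)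
--         frun.append(f)
--     blocks = []
--     for k in range(1, min(rows, cols) + 1):
--         for r in range(1, rows - k):
--             for c in range(1, cols - k):
--                 if (frun[r - 1][c] >= k and frun[r + k][c] >= k
--                         and all(zrun[r + i][c] >= k
--                                 and grid_lst[r + i][c - 1] == 5
--                                 and grid_lst[r + i][c + k] == 5
--                                 for i in range(k))):
--                     blocks.append((r, c, k))
--     return [[2 if any(br <= i < br + bk and bc <= j < bc + bk for (br, bc, bk) in blocks) else v
--              for j, v in enumerate(row)]
--             for i, row in enumerate(grid_lst)]
-- ===== Notes on version B (the rewrite author's own statement) =====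
-- stated objective: faster
-- what changed: B precomputes per-row run-length tables of 0s and 5s so each candidate block is tested in O(k) lookups instead of A's O(k^2) cell rescan, collects the valid blocks in a list, and builds the output functionally per cell instead of mutating via a set of coordinates; Pre_ excludes only the ragged grids on which A raises IndexError (some row shorter than the first).
import Mathlib
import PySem

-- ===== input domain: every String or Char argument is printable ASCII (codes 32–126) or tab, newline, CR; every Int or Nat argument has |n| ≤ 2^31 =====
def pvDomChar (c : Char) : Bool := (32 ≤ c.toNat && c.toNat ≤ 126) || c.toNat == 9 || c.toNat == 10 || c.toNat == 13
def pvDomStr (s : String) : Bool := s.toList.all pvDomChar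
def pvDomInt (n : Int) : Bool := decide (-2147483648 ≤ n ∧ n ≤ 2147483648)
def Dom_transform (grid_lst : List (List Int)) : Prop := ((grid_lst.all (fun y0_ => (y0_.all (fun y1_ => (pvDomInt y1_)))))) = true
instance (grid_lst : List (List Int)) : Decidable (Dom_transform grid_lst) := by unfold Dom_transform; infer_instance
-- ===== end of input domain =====

-- B precomputes per-row run-length tables of 0s and 5s, testing each candidate block in O(k)
-- instead of A's O(k^2) cell rescans, and builds the output functionally from a list of valid
-- blocks instead of mutating via a set of cells (A mutates only local copies, so return values
-- are all that is observable).

-- ===== PORT A =====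
-- total cell accessor for A's `grid[r][c]` (exact under Pre_transform: every index A reads is in range)
def pvCellA (g : List (List Int)) (r c : Nat) : Int := (g.getD r []).getD c 0

-- one iteration of A's innermost candidate loop: the `continue` chain of checks, then the
-- double loop of `to_fill.add(...)`; break-early scan loops are the conjunctions `.all`
def pvBody (g : List (List Int)) (rows cols k r c : Nat) (s : PySem.Set (Nat × Nat)) :
    PySem.Set (Nat × Nat) :=
  let allZero := (List.range k).all fun i => (List.range k).all fun j => pvCellA g (r+i) (c+j) == 0
  if !allZero then s else
  let top := decide (0 < r) && ((List.range k).all fun j => pvCellA g (r-1) (c+j) == 5)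
  if !top then s else
  let bottom := decide (r+k < rows) && ((List.range k).all fun j => pvCellA g (r+k) (c+j) == 5)
  if !bottom then s else
  let left := decide (0 < c) && ((List.range k).all fun i => pvCellA g (r+i) (c-1) == 5)
  if !left then s else
  let right := decide (c+k < cols) && ((List.range k).all fun i => pvCellA g (r+i) (c+k) == 5)
  if !right then s else
  (List.range k).foldl (fun s i => (List.range k).foldl (fun s j => PySem.Set.add s (r+i, c+j)) s) s

-- A's triple loop `for k in range(1, max_k+1): for r in ...: for c in ...` building to_fill
def pvToFill (g : List (List Int)) (rows cols : Nat) : PySem.Set (Nat × Nat) :=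
  (List.range (min rows cols)).foldl (fun s k0 =>
    let k := k0 + 1
    (List.range (rows - k + 1)).foldl (fun s r =>
      (List.range (cols - k + 1)).foldl (fun s c => pvBody g rows cols k r c s) s) s)
    PySem.Set.empty

def transform (grid_lst : List (List Int)) : List (List Int) :=
  if grid_lst = [] then [] else
  let rows := grid_lst.length
  let cols := (grid_lst.headD []).length
  -- `for pos in to_fill: output[i][j] = 2` — every write stores the same constant 2, so the result
  -- does not depend on the set's iteration order; we fold in the Set's list order.
  (pvToFill grid_lst rows cols).foldl
    (fun out p => out.modify p.1 (fun row => row.set p.2 2)) grid_lst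

-- ===== PORT B =====
-- Source B's backward in-row loop `for j in range(n-1,-1,-1): z[j] = z[j+1]+1 if row[j]==v else 0`
-- as the structural recursion it computes (one trailing 0 sentinel, as in the Python array)
def pvRunRow (v : Int) : List Int → List Nat
  | [] => [0]
  | x :: rest =>
    let t := pvRunRow v rest
    (if x = v then t.headD 0 + 1 else 0) :: t

-- the run tables zrun / frun (one row of runs per grid row, over the whole row)
def pvRunTab (v : Int) (g : List (List Int)) : List (List Nat) :=
  g.map fun row => pvRunRow v row

-- Source B's per-candidate O(k) test: two run-table lookups for the horizontal 5-borders, and one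
-- pass over the k rows (zero-run lookup + the two vertical 5-border cells)
def pvCheckB (g : List (List Int)) (k r c : Nat) : Bool :=
  let zrun := pvRunTab 0 g
  let frun := pvRunTab 5 g
  decide (k ≤ ((frun.getD (r-1) []).getD c 0)) &&
  decide (k ≤ ((frun.getD (r+k) []).getD c 0)) &&
  ((List.range k).all fun i =>
    decide (k ≤ ((zrun.getD (r+i) []).getD c 0)) &&
    (pvCellA g (r+i) (c-1) == 5) && (pvCellA g (r+i) (c+k) == 5))

-- Source B's triple loop collecting the valid blocks (r, c, k); r, c start at 1
def pvBlocks (g : List (List Int)) (rows cols : Nat) : List (Nat × Nat × Nat) :=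
  (List.range (min rows cols)).foldl (fun bs k0 =>
    let k := k0 + 1
    (List.range (rows - k - 1)).foldl (fun bs r0 =>
      let r := r0 + 1
      (List.range (cols - k - 1)).foldl (fun bs c0 =>
        let c := c0 + 1
        if pvCheckB g k r c then bs ++ [(r, c, k)] else bs) bs) bs) []

def transform_alt (grid_lst : List (List Int)) : List (List Int) :=
  if grid_lst = [] then [] else
  let rows := grid_lst.length
  let cols := (grid_lst.headD []).length
  let blocks := pvBlocks grid_lst rows cols
  -- the output comprehension: every cell rewritten from the block list
  grid_lst.mapIdx fun i row =>
    row.mapIdx fun j v =>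
      if blocks.any (fun b => decide (b.1 ≤ i) && decide (i < b.1 + b.2.2) &&
                              decide (b.2.1 ≤ j) && decide (j < b.2.1 + b.2.2))
      then 2 else v

-- ===== PRECONDITION & SPEC =====
-- Pre_ excludes exactly the grids on which Python A raises IndexError: some row shorter than the
-- first row (with k = 1 A scans every cell of every row up to the first row's width).
def Pre_transform (grid_lst : List (List Int)) : Prop :=
  ∀ row ∈ grid_lst, (grid_lst.headD []).length ≤ row.length
instance (grid_lst : List (List Int)) : Decidable (Pre_transform grid_lst) := by
  unfold Pre_transform; infer_instance

def pvWitness_transform : List (List Int) := [[5, 5, 5], [5, 0, 5], [5, 5, 5]]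

def Spec_transform (grid_lst : List (List Int)) (out : List (List Int)) : Prop := out = transform_alt grid_lst
instance (grid_lst : List (List Int)) (out : List (List Int)) : Decidable (Spec_transform grid_lst out) := by unfold Spec_transform; infer_instance

-- ===== CLAIM (what is proved, stated in full; the proofs are below) =====
def Claim_equal_transform : Prop := ∀ (grid_lst : List (List Int)), Dom_transform grid_lst → Pre_transform grid_lst → Spec_transform grid_lst (transform grid_lst)

-- ===== LEMMAS AND PROOFS =====

-- the valid-candidate condition of A, as a proposition
def pvCond (g : List (List Int)) (rows cols k r c : Nat) : Prop :=
  (∀ i < k, ∀ j < k, pvCellA g (r+i) (c+j) = 0) ∧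
  (0 < r ∧ ∀ j < k, pvCellA g (r-1) (c+j) = 5) ∧
  (r + k < rows ∧ ∀ j < k, pvCellA g (r+k) (c+j) = 5) ∧
  (0 < c ∧ ∀ i < k, pvCellA g (r+i) (c-1) = 5) ∧
  (c + k < cols ∧ ∀ i < k, pvCellA g (r+i) (c+k) = 5)

-- generic membership invariant for a foldl
theorem pvFoldlPredIff {β γ : Type} (M : γ → Prop) (P : β → Prop) (f : γ → β → γ) (l : List β)
    (hf : ∀ s x, x ∈ l → (M (f s x) ↔ M s ∨ P x)) :
    ∀ s, M (l.foldl f s) ↔ M s ∨ ∃ x ∈ l, P x := by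
  induction l with
  | nil => simp
  | cons x l ih =>
    intro s
    simp only [List.foldl_cons]
    rw [ih (fun s x hx => hf s x (List.mem_cons_of_mem _ hx)) (f s x),
        hf s x (List.mem_cons_self)]
    simp only [List.mem_cons]
    constructor
    · rintro ((h | h) | ⟨y, hy, hP⟩)
      · exact Or.inl h
      · exact Or.inr ⟨x, Or.inl rfl, h⟩
      · exact Or.inr ⟨y, Or.inr hy, hP⟩
    · rintro (h | ⟨y, (rfl | hy), hP⟩)
      · exact Or.inl (Or.inl h)
      · exact Or.inl (Or.inr hP)
      · exact Or.inr ⟨y, hy, hP⟩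

theorem mem_pvBody (g : List (List Int)) (rows cols k r c : Nat) (s : PySem.Set (Nat × Nat))
    (e : Nat × Nat) :
    e ∈ pvBody g rows cols k r c s ↔
      e ∈ s ∨ (pvCond g rows cols k r c ∧ ∃ i < k, ∃ j < k, e = (r+i, c+j)) := by
  have haddpair : ∀ (s : PySem.Set (Nat × Nat)) (i : Nat),
      e ∈ (List.range k).foldl (fun s j => PySem.Set.add s (r+i, c+j)) s ↔
      e ∈ s ∨ ∃ j < k, e = (r+i, c+j) := by
    intro s i
    have := pvFoldlPredIff (fun t => e ∈ t) (fun j => e = (r+i, c+j))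
      (fun s j => PySem.Set.add s (r+i, c+j)) (List.range k)
      (fun s j _ => PySem.Set.mem_add s (r+i, c+j) e) s
    simpa [List.mem_range] using this
  have haddblock : ∀ (s : PySem.Set (Nat × Nat)),
      e ∈ (List.range k).foldl
            (fun s i => (List.range k).foldl (fun s j => PySem.Set.add s (r+i, c+j)) s) s ↔
      e ∈ s ∨ ∃ i < k, ∃ j < k, e = (r+i, c+j) := by
    intro s
    have := pvFoldlPredIff (fun t => e ∈ t) (fun i => ∃ j < k, e = (r+i, c+j))
      (fun s i => (List.range k).foldl (fun s j => PySem.Set.add s (r+i, c+j)) s) (List.range k)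
      (fun s i _ => haddpair s i) s
    simpa [List.mem_range] using this
  have dAZ : (((List.range k).all fun i => (List.range k).all fun j => pvCellA g (r+i) (c+j) == 0) = true)
      ↔ (∀ i < k, ∀ j < k, pvCellA g (r+i) (c+j) = 0) := by
    simp [List.all_eq_true, List.mem_range]
  have dTop : ((decide (0 < r) && ((List.range k).all fun j => pvCellA g (r-1) (c+j) == 5)) = true)
      ↔ (0 < r ∧ ∀ j < k, pvCellA g (r-1) (c+j) = 5) := by
    simp [List.all_eq_true, List.mem_range]
  have dBottom : ((decide (r+k < rows) && ((List.range k).all fun j => pvCellA g (r+k) (c+j) == 5)) = true)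
      ↔ (r + k < rows ∧ ∀ j < k, pvCellA g (r+k) (c+j) = 5) := by
    simp [List.all_eq_true, List.mem_range]
  have dLeft : ((decide (0 < c) && ((List.range k).all fun i => pvCellA g (r+i) (c-1) == 5)) = true)
      ↔ (0 < c ∧ ∀ i < k, pvCellA g (r+i) (c-1) = 5) := by
    simp [List.all_eq_true, List.mem_range]
  have dRight : ((decide (c+k < cols) && ((List.range k).all fun i => pvCellA g (r+i) (c+k) == 5)) = true)
      ↔ (c + k < cols ∧ ∀ i < k, pvCellA g (r+i) (c+k) = 5) := by
    simp [List.all_eq_true, List.mem_range]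
  simp only [pvBody]
  split_ifs with h1 h2 h3 h4 h5
  · have hno : ¬ pvCond g rows cols k r c := by
      intro hC
      rw [Bool.not_eq_true'] at h1
      exact absurd (dAZ.mpr hC.1) (by simp [h1])
    exact ⟨fun h => Or.inl h, fun h => h.resolve_right (fun hx => hno hx.1)⟩
  · have hno : ¬ pvCond g rows cols k r c := by
      intro hC
      rw [Bool.not_eq_true'] at h2
      exact absurd (dTop.mpr hC.2.1) (by simp [h2])
    exact ⟨fun h => Or.inl h, fun h => h.resolve_right (fun hx => hno hx.1)⟩
  · have hno : ¬ pvCond g rows cols k r c := by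
      intro hC
      rw [Bool.not_eq_true'] at h3
      exact absurd (dBottom.mpr hC.2.2.1) (by simp [h3])
    exact ⟨fun h => Or.inl h, fun h => h.resolve_right (fun hx => hno hx.1)⟩
  · have hno : ¬ pvCond g rows cols k r c := by
      intro hC
      rw [Bool.not_eq_true'] at h4
      exact absurd (dLeft.mpr hC.2.2.2.1) (by simp [h4])
    exact ⟨fun h => Or.inl h, fun h => h.resolve_right (fun hx => hno hx.1)⟩
  · have hno : ¬ pvCond g rows cols k r c := by
      intro hC
      rw [Bool.not_eq_true'] at h5
      exact absurd (dRight.mpr hC.2.2.2.2) (by simp [h5])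
    exact ⟨fun h => Or.inl h, fun h => h.resolve_right (fun hx => hno hx.1)⟩
  · rw [haddblock]
    simp only [Bool.not_eq_true, Bool.not_eq_false'] at h1 h2 h3 h4 h5
    have hC : pvCond g rows cols k r c :=
      ⟨dAZ.mp h1, dTop.mp h2, dBottom.mp h3, dLeft.mp h4, dRight.mp h5⟩
    exact ⟨fun h => h.imp id (fun hx => ⟨hC, hx⟩), fun h => h.imp id (fun hx => hx.2)⟩

theorem mem_pvToFill (g : List (List Int)) (rows cols : Nat) (e : Nat × Nat) :
    e ∈ pvToFill g rows cols ↔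
      ∃ k0 < min rows cols, ∃ r < rows - (k0+1) + 1, ∃ c < cols - (k0+1) + 1,
        pvCond g rows cols (k0+1) r c ∧ ∃ i < k0+1, ∃ j < k0+1, e = (r+i, c+j) := by
  have hc : ∀ (k0 r : Nat) (s : PySem.Set (Nat × Nat)),
      e ∈ (List.range (cols - (k0+1) + 1)).foldl (fun s c => pvBody g rows cols (k0+1) r c s) s ↔
      e ∈ s ∨ ∃ c < cols - (k0+1) + 1,
        pvCond g rows cols (k0+1) r c ∧ ∃ i < k0+1, ∃ j < k0+1, e = (r+i, c+j) := by
    intro k0 r s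
    have := pvFoldlPredIff (fun t => e ∈ t)
      (fun c => pvCond g rows cols (k0+1) r c ∧ ∃ i < k0+1, ∃ j < k0+1, e = (r+i, c+j))
      (fun s c => pvBody g rows cols (k0+1) r c s) (List.range (cols - (k0+1) + 1))
      (fun s c _ => mem_pvBody g rows cols (k0+1) r c s e) s
    simpa [List.mem_range] using this
  have hr : ∀ (k0 : Nat) (s : PySem.Set (Nat × Nat)),
      e ∈ (List.range (rows - (k0+1) + 1)).foldl
            (fun s r => (List.range (cols - (k0+1) + 1)).foldl
              (fun s c => pvBody g rows cols (k0+1) r c s) s) s ↔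
      e ∈ s ∨ ∃ r < rows - (k0+1) + 1, ∃ c < cols - (k0+1) + 1,
        pvCond g rows cols (k0+1) r c ∧ ∃ i < k0+1, ∃ j < k0+1, e = (r+i, c+j) := by
    intro k0 s
    have := pvFoldlPredIff (fun t => e ∈ t)
      (fun r => ∃ c < cols - (k0+1) + 1,
        pvCond g rows cols (k0+1) r c ∧ ∃ i < k0+1, ∃ j < k0+1, e = (r+i, c+j))
      (fun s r => (List.range (cols - (k0+1) + 1)).foldl
        (fun s c => pvBody g rows cols (k0+1) r c s) s) (List.range (rows - (k0+1) + 1))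
      (fun s r _ => hc k0 r s) s
    simpa [List.mem_range] using this
  have hk := pvFoldlPredIff (fun t => e ∈ t)
    (fun k0 => ∃ r < rows - (k0+1) + 1, ∃ c < cols - (k0+1) + 1,
      pvCond g rows cols (k0+1) r c ∧ ∃ i < k0+1, ∃ j < k0+1, e = (r+i, c+j))
    (fun s k0 =>
      let k := k0 + 1
      (List.range (rows - k + 1)).foldl (fun s r =>
        (List.range (cols - k + 1)).foldl (fun s c => pvBody g rows cols k r c s) s) s)
    (List.range (min rows cols)) (fun s k0 _ => hr k0 s) PySem.Set.empty
  unfold pvToFill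
  simpa [List.mem_range, PySem.Set.empty] using hk

theorem mem_pvBlocks (g : List (List Int)) (rows cols : Nat) (b : Nat × Nat × Nat) :
    b ∈ pvBlocks g rows cols ↔
      ∃ k0 < min rows cols, ∃ r0 < rows - (k0+1) - 1, ∃ c0 < cols - (k0+1) - 1,
        pvCheckB g (k0+1) (r0+1) (c0+1) = true ∧ b = (r0+1, c0+1, k0+1) := by
  have hc : ∀ (k0 r0 : Nat) (bs : List (Nat × Nat × Nat)),
      b ∈ (List.range (cols - (k0+1) - 1)).foldl (fun bs c0 =>
            if pvCheckB g (k0+1) (r0+1) (c0+1) then bs ++ [(r0+1, c0+1, k0+1)] else bs) bs ↔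
      b ∈ bs ∨ ∃ c0 < cols - (k0+1) - 1,
        pvCheckB g (k0+1) (r0+1) (c0+1) = true ∧ b = (r0+1, c0+1, k0+1) := by
    intro k0 r0 bs
    have := pvFoldlPredIff (fun t => b ∈ t)
      (fun c0 => pvCheckB g (k0+1) (r0+1) (c0+1) = true ∧ b = (r0+1, c0+1, k0+1))
      (fun bs c0 => if pvCheckB g (k0+1) (r0+1) (c0+1) then bs ++ [(r0+1, c0+1, k0+1)] else bs)
      (List.range (cols - (k0+1) - 1))
      (fun bs c0 _ => by dsimp only; split_ifs with h <;> simp [h]) bs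
    simpa [List.mem_range] using this
  have hr : ∀ (k0 : Nat) (bs : List (Nat × Nat × Nat)),
      b ∈ (List.range (rows - (k0+1) - 1)).foldl (fun bs r0 =>
            (List.range (cols - (k0+1) - 1)).foldl (fun bs c0 =>
              if pvCheckB g (k0+1) (r0+1) (c0+1) then bs ++ [(r0+1, c0+1, k0+1)] else bs) bs) bs ↔
      b ∈ bs ∨ ∃ r0 < rows - (k0+1) - 1, ∃ c0 < cols - (k0+1) - 1,
        pvCheckB g (k0+1) (r0+1) (c0+1) = true ∧ b = (r0+1, c0+1, k0+1) := by
    intro k0 bs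
    have := pvFoldlPredIff (fun t => b ∈ t)
      (fun r0 => ∃ c0 < cols - (k0+1) - 1,
        pvCheckB g (k0+1) (r0+1) (c0+1) = true ∧ b = (r0+1, c0+1, k0+1))
      (fun bs r0 => (List.range (cols - (k0+1) - 1)).foldl (fun bs c0 =>
        if pvCheckB g (k0+1) (r0+1) (c0+1) then bs ++ [(r0+1, c0+1, k0+1)] else bs) bs)
      (List.range (rows - (k0+1) - 1)) (fun bs r0 _ => hc k0 r0 bs) bs
    simpa [List.mem_range] using this
  have hk := pvFoldlPredIff (fun t => b ∈ t)
    (fun k0 => ∃ r0 < rows - (k0+1) - 1, ∃ c0 < cols - (k0+1) - 1,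
      pvCheckB g (k0+1) (r0+1) (c0+1) = true ∧ b = (r0+1, c0+1, k0+1))
    (fun bs k0 =>
      let k := k0 + 1
      (List.range (rows - k - 1)).foldl (fun bs r0 =>
        let r := r0 + 1
        (List.range (cols - k - 1)).foldl (fun bs c0 =>
          let c := c0 + 1
          if pvCheckB g k r c then bs ++ [(r, c, k)] else bs) bs) bs)
    (List.range (min rows cols)) (fun bs k0 _ => hr k0 bs) []
  unfold pvBlocks
  simpa [List.mem_range] using hk

-- run-length table: k ≤ run at j ↔ the next k entries exist and equal v
theorem pvRunRow_ge (v : Int) (l : List Int) :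
    ∀ (j k : Nat), (k ≤ (pvRunRow v l).getD j 0) ↔ ∀ t < k, j + t < l.length ∧ l.getD (j+t) 0 = v := by
  induction l with
  | nil =>
    intro j k
    constructor
    · intro h t ht
      exfalso
      have : (pvRunRow v []).getD j 0 = 0 := by
        cases j <;> simp [pvRunRow]
      omega
    · intro h
      rcases Nat.eq_zero_or_pos k with hk | hk
      · omega
      · exact absurd (h 0 hk).1 (by simp)
  | cons x rest ih =>
    intro j k
    cases j with
    | zero =>
      cases k with
      | zero => simp
      | succ m =>
        by_cases hx : x = v
        · have hhead : (pvRunRow v rest).headD 0 = (pvRunRow v rest).getD 0 0 := by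
            cases hrr : pvRunRow v rest <;> simp
          simp only [pvRunRow, if_pos hx, List.getD_cons_zero, hhead]
          rw [show (m + 1 ≤ (pvRunRow v rest).getD 0 0 + 1) ↔ (m ≤ (pvRunRow v rest).getD 0 0) by omega,
              ih 0 m]
          constructor
          · intro h t ht
            cases t with
            | zero => simpa using hx
            | succ u =>
              have := h u (by omega)
              simp only [List.length_cons]
              constructor
              · omega
              · simpa using this.2
          · intro h t ht
            have := h (t+1) (by omega)
            simp only [List.length_cons] at this
            constructor
            · omega
            · simpa using this.2
        · simp only [pvRunRow, if_neg hx, List.getD_cons_zero]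
          constructor
          · omega
          · intro h
            have := (h 0 (by omega)).2
            simp at this
            omega
    | succ j' =>
      simp only [pvRunRow, List.getD_cons_succ, List.length_cons]
      rw [ih j' k]
      constructor
      · intro h t ht
        have := h t ht
        have hidx : j' + 1 + t = (j' + t) + 1 := by omega
        rw [hidx, List.getD_cons_succ]
        exact ⟨by omega, this.2⟩
      · intro h t ht
        have := h t ht
        have hidx : j' + 1 + t = (j' + t) + 1 := by omega
        rw [hidx, List.getD_cons_succ] at this
        exact ⟨by omega, this.2⟩

theorem pvRunTab_ge (v : Int) (g : List (List Int)) (i c k : Nat)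
    (hi : i < g.length) (hck : c + k ≤ (g.getD i []).length) :
    (k ≤ (((pvRunTab v g).getD i []).getD c 0)) ↔ ∀ t < k, pvCellA g i (c+t) = v := by
  have hrow : (pvRunTab v g).getD i [] = pvRunRow v (g.getD i []) := by
    simp [pvRunTab, List.getD_eq_getElem?_getD, List.getElem?_map,
          List.getElem?_eq_getElem hi]
  rw [hrow, pvRunRow_ge]
  constructor
  · intro h t ht
    simpa [pvCellA] using (h t ht).2
  · intro h t ht
    exact ⟨by omega, by simpa [pvCellA] using h t ht⟩

theorem pvLenAt (g : List (List Int)) (cols : Nat) (hpre : ∀ row ∈ g, cols ≤ row.length) :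
    ∀ i, i < g.length → cols ≤ (g.getD i []).length := by
  intro i hi
  have hmem : g.getD i [] ∈ g := by
    rw [List.getD_eq_getElem?_getD, List.getElem?_eq_getElem hi]
    exact List.getElem_mem hi
  exact hpre _ hmem

-- A's candidate condition ↔ B's candidate test (inside A's candidate ranges)
theorem pvCond_iff_checkB (g : List (List Int)) (rows cols k r c : Nat)
    (hrows : rows = g.length) (hpre : ∀ row ∈ g, cols ≤ row.length) (hk : 1 ≤ k) :
    pvCond g rows cols k r c ↔
      (1 ≤ r ∧ r + k < rows ∧ 1 ≤ c ∧ c + k < cols ∧ pvCheckB g k r c = true) := by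
  have hlenAt := pvLenAt g cols hpre
  constructor
  · rintro ⟨hAZ, ⟨hr1, hTop⟩, ⟨hrk, hBot⟩, ⟨hc1, hLeft⟩, ⟨hck, hRight⟩⟩
    refine ⟨hr1, hrk, hc1, hck, ?_⟩
    simp only [pvCheckB, Bool.and_eq_true, List.all_eq_true, List.mem_range,
               decide_eq_true_eq, beq_iff_eq]
    refine ⟨⟨?_, ?_⟩, ?_⟩
    · exact (pvRunTab_ge 5 g (r-1) c k (by omega) (by have := hlenAt (r-1) (by omega); omega)).mpr hTop
    · exact (pvRunTab_ge 5 g (r+k) c k (by omega) (by have := hlenAt (r+k) (by omega); omega)).mpr hBot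
    · intro i hi
      exact ⟨⟨(pvRunTab_ge 0 g (r+i) c k (by omega) (by have := hlenAt (r+i) (by omega); omega)).mpr
               (fun t ht => hAZ i hi t ht), hLeft i hi⟩, hRight i hi⟩
  · rintro ⟨hr1, hrk, hc1, hck, hB⟩
    simp only [pvCheckB, Bool.and_eq_true, List.all_eq_true, List.mem_range,
               decide_eq_true_eq, beq_iff_eq] at hB
    obtain ⟨⟨hTop, hBot⟩, hAll⟩ := hB
    refine ⟨?_, ⟨hr1, ?_⟩, ⟨hrk, ?_⟩, ⟨hc1, ?_⟩, ⟨hck, ?_⟩⟩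
    · intro i hi j hj
      exact (pvRunTab_ge 0 g (r+i) c k (by omega) (by have := hlenAt (r+i) (by omega); omega)).mp
              (hAll i hi).1.1 j hj
    · exact (pvRunTab_ge 5 g (r-1) c k (by omega) (by have := hlenAt (r-1) (by omega); omega)).mp hTop
    · exact (pvRunTab_ge 5 g (r+k) c k (by omega) (by have := hlenAt (r+k) (by omega); omega)).mp hBot
    · intro i hi; exact (hAll i hi).1.2
    · intro i hi; exact (hAll i hi).2

-- rendering of A's fill loop
theorem pvRender (L : List (Nat × Nat)) :
    ∀ (out : List (List Int)),
      (∀ p ∈ L, p.1 < out.length ∧ p.2 < (out.getD p.1 []).length) →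
      (L.foldl (fun o (p : Nat × Nat) => o.modify p.1 (fun row => row.set p.2 2)) out).length = out.length ∧
      (∀ i, ((L.foldl (fun o (p : Nat × Nat) => o.modify p.1 (fun row => row.set p.2 2)) out).getD i []).length
              = (out.getD i []).length) ∧
      (∀ i j, ((L.foldl (fun o (p : Nat × Nat) => o.modify p.1 (fun row => row.set p.2 2)) out).getD i []).getD j 0
              = if (i, j) ∈ L then 2 else (out.getD i []).getD j 0) := by
  induction L with
  | nil =>
    intro out _
    exact ⟨rfl, fun i => rfl, fun i j => by simp⟩
  | cons p L ih =>
    intro out hL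
    have hp := hL p List.mem_cons_self
    have hlen : (out.modify p.1 (fun row => row.set p.2 2)).length = out.length :=
      List.length_modify _ _ _
    have hrowget : ∀ i, (out.modify p.1 (fun row => row.set p.2 2)).getD i [] =
        if p.1 = i then (out.getD i []).set p.2 2 else out.getD i [] := by
      intro i
      rw [List.getD_eq_getElem?_getD, List.getD_eq_getElem?_getD, List.getElem?_modify]
      cases hoi : out[i]? with
      | none => simp
      | some row => by_cases hpi : p.1 = i <;> simp [hpi]
    have hrowlen : ∀ i, ((out.modify p.1 (fun row => row.set p.2 2)).getD i []).length
        = (out.getD i []).length := by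
      intro i
      rw [hrowget i]
      by_cases hpi : p.1 = i <;> simp [hpi]
    have hcell : ∀ i j, ((out.modify p.1 (fun row => row.set p.2 2)).getD i []).getD j 0
        = if (i, j) = p then 2 else (out.getD i []).getD j 0 := by
      intro i j
      rw [hrowget i]
      by_cases hpi : p.1 = i
      · subst hpi
        rw [if_pos rfl, List.getD_eq_getElem?_getD (l := (out.getD p.1 []).set p.2 2),
            List.getElem?_set]
        by_cases hpj : p.2 = j
        · subst hpj
          have hlt : p.2 < (out[p.1]?.getD []).length := by
            rw [← List.getD_eq_getElem?_getD]; exact hp.2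
          simp [hlt]
        · rw [if_neg hpj, ← List.getD_eq_getElem?_getD,
              if_neg (fun h => hpj (by rw [← h]))]
      · rw [if_neg hpi, if_neg (fun h => hpi (by rw [← h]))]
    have hL' : ∀ q ∈ L, q.1 < (out.modify p.1 (fun row => row.set p.2 2)).length ∧
        q.2 < ((out.modify p.1 (fun row => row.set p.2 2)).getD q.1 []).length := by
      intro q hq
      have := hL q (List.mem_cons_of_mem _ hq)
      rw [hlen, hrowlen]
      exact this
    obtain ⟨ih1, ih2, ih3⟩ := ih (out.modify p.1 (fun row => row.set p.2 2)) hL'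
    simp only [List.foldl_cons]
    refine ⟨ih1.trans hlen, fun i => (ih2 i).trans (hrowlen i), fun i j => ?_⟩
    rw [ih3 i j, hcell i j]
    by_cases hmem : (i, j) ∈ L
    · simp [hmem, List.mem_cons]
    · by_cases heq : (i, j) = p <;> simp [hmem, heq, List.mem_cons]

-- the two marking conditions agree cell by cell
theorem pvFill_iff_covered (g : List (List Int)) (rows cols : Nat)
    (hrows : rows = g.length) (hpre : ∀ row ∈ g, cols ≤ row.length) (i j : Nat) :
    (i, j) ∈ pvToFill g rows cols ↔
      (∃ b ∈ pvBlocks g rows cols, b.1 ≤ i ∧ i < b.1 + b.2.2 ∧ b.2.1 ≤ j ∧ j < b.2.1 + b.2.2) := by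
  rw [mem_pvToFill]
  constructor
  · rintro ⟨k0, hk0, r, hrlt, c, hclt, hC, ii, hii, jj, hjj, heq⟩
    obtain ⟨hi, hj⟩ : i = r + ii ∧ j = c + jj := by
      simpa [Prod.mk.injEq] using heq
    obtain ⟨hr1, hrk, hc1, hck, hchk⟩ :=
      (pvCond_iff_checkB g rows cols (k0+1) r c hrows hpre (by omega)).mp hC
    have er : r - 1 + 1 = r := by omega
    have ec : c - 1 + 1 = c := by omega
    refine ⟨(r, c, k0+1), ?_,
      show r ≤ i ∧ i < r + (k0+1) ∧ c ≤ j ∧ j < c + (k0+1) from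
        ⟨by omega, by omega, by omega, by omega⟩⟩
    rw [mem_pvBlocks]
    exact ⟨k0, hk0, r-1, by omega, c-1, by omega, by rw [er, ec]; exact ⟨hchk, rfl⟩⟩
  · rintro ⟨b, hb, hb1, hb2, hb3, hb4⟩
    rw [mem_pvBlocks] at hb
    obtain ⟨k0, hk0, r0, hr0, c0, hc0, hchk, rfl⟩ := hb
    have hb1' : r0 + 1 ≤ i := hb1
    have hb2' : i < r0 + 1 + (k0 + 1) := hb2
    have hb3' : c0 + 1 ≤ j := hb3
    have hb4' : j < c0 + 1 + (k0 + 1) := hb4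
    have hC := (pvCond_iff_checkB g rows cols (k0+1) (r0+1) (c0+1) hrows hpre (by omega)).mpr
      ⟨by omega, by omega, by omega, by omega, hchk⟩
    exact ⟨k0, hk0, r0+1, by omega, c0+1, by omega, hC, i - (r0+1), by omega, j - (c0+1),
      by omega, by simp only [Prod.mk.injEq]; omega⟩

-- members of to_fill are in range
theorem pvToFill_inRange (g : List (List Int)) (rows cols : Nat)
    (hrows : rows = g.length) (hpre : ∀ row ∈ g, cols ≤ row.length) :
    ∀ p ∈ pvToFill g rows cols, p.1 < g.length ∧ p.2 < (g.getD p.1 []).length := by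
  intro p hp
  rw [mem_pvToFill] at hp
  obtain ⟨k0, hk0, r, hrlt, c, hclt, hC, ii, hii, jj, hjj, heq⟩ := hp
  obtain ⟨hrk, -⟩ := hC.2.2.1
  obtain ⟨hck, -⟩ := hC.2.2.2.2
  have h1 : p.1 = r + ii := by rw [heq]
  have h2 : p.2 = c + jj := by rw [heq]
  have hp1 : p.1 < g.length := by rw [h1, ← hrows]; omega
  refine ⟨hp1, ?_⟩
  have hcl := pvLenAt g cols hpre p.1 hp1
  rw [h2]
  omega

-- ===== VERDICT (by name: the statement is the Claim_ definition above) =====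
theorem transform_spec : Claim_equal_transform := by
  unfold Claim_equal_transform
  intro g _hdom hpre
  unfold Spec_transform
  by_cases hg : g = []
  · subst hg; rfl
  · have hpre' : ∀ row ∈ g, (g.headD []).length ≤ row.length := hpre
    simp only [transform, transform_alt, if_neg hg]
    set cols := (g.headD []).length with hcols
    obtain ⟨hLen, hRowLen, hCell⟩ :=
      pvRender (pvToFill g g.length cols) g (pvToFill_inRange g g.length cols rfl hpre')
    have hmemiff := pvFill_iff_covered g g.length cols rfl hpre'
    have hanyiff : ∀ i j : Nat,
        ((pvBlocks g g.length cols).any (fun b =>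
          decide (b.1 ≤ i) && decide (i < b.1 + b.2.2) &&
          decide (b.2.1 ≤ j) && decide (j < b.2.1 + b.2.2)) = true) ↔
        (i, j) ∈ pvToFill g g.length cols := by
      intro i j
      simp only [List.any_eq_true, Bool.and_eq_true, decide_eq_true_eq, and_assoc]
      exact (hmemiff i j).symm
    apply List.ext_getElem
    · rw [hLen, List.length_mapIdx]
    · intro i h1 h2
      have hiG : i < g.length := by rw [hLen] at h1; exact h1
      have hGrow : g.getD i [] = g[i] := List.getD_eq_getElem g [] hiG
      rw [List.getElem_mapIdx]
      have hFrow : (List.foldl (fun out p => out.modify p.1 fun row => row.set p.2 2) g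
          (pvToFill g g.length cols))[i]
          = (List.foldl (fun out p => out.modify p.1 fun row => row.set p.2 2) g
              (pvToFill g g.length cols)).getD i [] :=
        (List.getD_eq_getElem _ [] h1).symm
      have hRowLenI : (List.foldl (fun out p => out.modify p.1 fun row => row.set p.2 2) g
          (pvToFill g g.length cols))[i].length = g[i].length := by
        rw [hFrow, hRowLen i, hGrow]
      apply List.ext_getElem
      · rw [hRowLenI, List.length_mapIdx]
      · intro j hj1 hj2
        have hjG : j < g[i].length := by rw [← hRowLenI]; exact hj1
        have hLHS : (List.foldl (fun out p => out.modify p.1 fun row => row.set p.2 2) g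
            (pvToFill g g.length cols))[i][j]
            = if (i, j) ∈ pvToFill g g.length cols then 2 else g[i][j] := by
          have hjd : j < ((List.foldl (fun out p => out.modify p.1 fun row => row.set p.2 2) g
              (pvToFill g g.length cols)).getD i []).length := by
            rw [hRowLen i, hGrow]; exact hjG
          calc (List.foldl (fun out p => out.modify p.1 fun row => row.set p.2 2) g
              (pvToFill g g.length cols))[i][j]
              = ((List.foldl (fun out p => out.modify p.1 fun row => row.set p.2 2) g
                  (pvToFill g g.length cols)).getD i []).getD j 0 := by
                rw [List.getD_eq_getElem _ 0 hjd]
                congr 1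
            _ = if (i, j) ∈ pvToFill g g.length cols then 2 else (g.getD i []).getD j 0 :=
                hCell i j
            _ = if (i, j) ∈ pvToFill g g.length cols then 2 else g[i][j] := by
                rw [hGrow, List.getD_eq_getElem _ 0 hjG]
        rw [hLHS, List.getElem_mapIdx]
        by_cases hmem : (i, j) ∈ pvToFill g g.length cols
        · rw [if_pos hmem, if_pos ((hanyiff i j).mpr hmem)]
        · rw [if_neg hmem, if_neg (fun h => hmem ((hanyiff i j).mp h))]
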